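-- pv_equiv track=rewrite | github.com/guilhermegouw/Learn-to-code-by-solving-problems | chapter_4/take_a_number/take_a_number.py | take_a_number
-- ===== SOURCE A (Python) =====
-- def take_a_number(next_num: int, activities: list[int]) -> list[tuple[int]]:
--     late_students = 0
--     served_students = 0
--     in_line_students = 0
--     prints = []
--     for activity in activities:
--         if activity == "TAKE":
--             late_students += 1
--             next_num += 1
--             in_line_students += 1
--         if activity == "SERVE":
--             served_students += 1
--             in_line_students -= 1
--         if activity == "CLOSE":
--             prints.append((late_students, in_line_students, next_num))
--             late_students = 0
--             served_students = 0
--             in_line_students = 0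
--     return prints
-- ===== SOURCE B (Python) =====
-- def take_a_number(next_num, activities):
--     # split into sessions at each CLOSE; a trailing unterminated group is discarded
--     sessions = []
--     cur = []
--     for a in activities:
--         if a == "CLOSE":
--             sessions.append(cur)
--             cur = []
--         else:
--             cur.append(a)
--     out = []
--     for s in sessions:
--         takes = s.count("TAKE")
--         serves = s.count("SERVE")
--         next_num += takes
--         out.append((takes, takes - serves, next_num))
--     return out
-- ===== Notes on version B (the rewrite author's own statement) =====
-- stated objective: alternative
-- what changed: B first splits the activity stream into CLOSE-terminated session groups, then emits one tuple per session from per-session TAKE/SERVE counts and a running next_num, instead of A's single loop over per-token counters.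
import Mathlib
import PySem

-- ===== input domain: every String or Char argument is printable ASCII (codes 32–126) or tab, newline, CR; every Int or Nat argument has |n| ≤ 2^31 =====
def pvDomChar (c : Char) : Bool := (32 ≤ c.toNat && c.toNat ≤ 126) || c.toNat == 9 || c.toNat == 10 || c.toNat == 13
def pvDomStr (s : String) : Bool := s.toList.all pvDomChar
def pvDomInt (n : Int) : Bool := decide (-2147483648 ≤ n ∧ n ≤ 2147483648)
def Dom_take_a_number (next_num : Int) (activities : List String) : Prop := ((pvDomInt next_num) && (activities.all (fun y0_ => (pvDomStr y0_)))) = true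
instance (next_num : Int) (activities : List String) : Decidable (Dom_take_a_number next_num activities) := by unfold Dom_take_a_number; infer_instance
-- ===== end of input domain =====

-- B restructures A's single counter loop into split-into-sessions + per-session counts with a running next_num (objective: alternative decomposition, same cost).

-- ===== PORT A =====
-- state: (late_students, served_students, in_line_students, next_num, prints)
def aLoop (late served inline next_num : Int) (prints : List (Int × Int × Int)) :
    List String → List (Int × Int × Int)
  | [] => prints
  | a :: rest =>
    let late := if a = "TAKE" then late + 1 else late
    let next_num := if a = "TAKE" then next_num + 1 else next_num
    let inline := if a = "TAKE" then inline + 1 else inline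
    let served := if a = "SERVE" then served + 1 else served
    let inline := if a = "SERVE" then inline - 1 else inline
    if a = "CLOSE" then
      aLoop 0 0 0 next_num (prints ++ [(late, inline, next_num)]) rest
    else
      aLoop late served inline next_num prints rest

def take_a_number (next_num : Int) (activities : List String) : List (Int × Int × Int) :=
  aLoop 0 0 0 next_num [] activities

-- ===== PORT B =====
-- split into CLOSE-terminated session groups; the trailing unterminated group is dropped
def splitSessions (cur : List String) : List String → List (List String)
  | [] => []
  | a :: rest => if a = "CLOSE" then cur :: splitSessions [] rest
                 else splitSessions (cur ++ [a]) rest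

-- one output tuple per session, threading a running next_num
def emitSessions (next_num : Int) : List (List String) → List (Int × Int × Int)
  | [] => []
  | s :: rest =>
    let takes : Int := PySem.List.count s "TAKE"
    let serves : Int := PySem.List.count s "SERVE"
    (takes, takes - serves, next_num + takes) :: emitSessions (next_num + takes) rest

def take_a_number_alt (next_num : Int) (activities : List String) : List (Int × Int × Int) :=
  emitSessions next_num (splitSessions [] activities)

-- ===== PRECONDITION & SPEC =====
def Spec_take_a_number (next_num : Int) (activities : List String) (out : List (Int × Int × Int)) : Prop := out = take_a_number_alt next_num activities
instance (next_num : Int) (activities : List String) (out : List (Int × Int × Int)) : Decidable (Spec_take_a_number next_num activities out) := by unfold Spec_take_a_number; infer_instance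

-- ===== CLAIM (what is proved, stated in full; the proofs are below) =====
def Claim_equal_take_a_number : Prop := ∀ (next_num : Int) (activities : List String), Dom_take_a_number next_num activities → Spec_take_a_number next_num activities (take_a_number next_num activities)

-- ===== LEMMAS AND PROOFS =====

-- loop invariant: A's state is determined by the current (partial) session `cur`
-- late = count cur TAKE, inline = takes - serves, next_num = base + takes
theorem aLoop_eq_emit (rest : List String) :
    ∀ (cur : List String) (served next_num : Int) (prints : List (Int × Int × Int)),
    aLoop ((PySem.List.count cur "TAKE" : Int)) served
          ((PySem.List.count cur "TAKE" : Int) - (PySem.List.count cur "SERVE" : Int))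
          (next_num + (PySem.List.count cur "TAKE" : Int)) prints rest
      = prints ++ emitSessions next_num (splitSessions cur rest) := by
  induction rest with
  | nil => intro cur served next_num prints; simp [aLoop, splitSessions, emitSessions]
  | cons a rest ih =>
    intro cur served next_num prints
    by_cases hc : a = "CLOSE"
    · subst hc
      simp only [aLoop, splitSessions]
      norm_num
      have := ih [] 0 (next_num + (PySem.List.count cur "TAKE" : Int))
        (prints ++ [((PySem.List.count cur "TAKE" : Int),
          (PySem.List.count cur "TAKE" : Int) - (PySem.List.count cur "SERVE" : Int),
          next_num + (PySem.List.count cur "TAKE" : Int))])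
      simpa [PySem.List.count] using this
    · by_cases ht : a = "TAKE"
      · subst ht
        simp only [aLoop, splitSessions]
        norm_num
        have := ih (cur ++ ["TAKE"]) served next_num prints
        have hT : PySem.List.count (cur ++ ["TAKE"]) "TAKE" = PySem.List.count cur "TAKE" + 1 := by
          simp [PySem.List.count]
        have hS : PySem.List.count (cur ++ ["TAKE"]) "SERVE" = PySem.List.count cur "SERVE" := by
          simp [PySem.List.count]
        rw [hT, hS] at this
        push_cast at this ⊢
        convert this using 2 <;> simp only [PySem.List.count] <;> ring
      · simp only [aLoop, splitSessions, if_neg hc, if_neg ht]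
        by_cases hs : a = "SERVE"
        · subst hs
          have := ih (cur ++ ["SERVE"]) (served + 1) next_num prints
          have hT : PySem.List.count (cur ++ ["SERVE"]) "TAKE" = PySem.List.count cur "TAKE" := by
            simp [PySem.List.count]
          have hS : PySem.List.count (cur ++ ["SERVE"]) "SERVE" = PySem.List.count cur "SERVE" + 1 := by
            simp [PySem.List.count]
          rw [hT, hS] at this
          push_cast at this ⊢
          norm_num
          convert this using 2 <;> simp only [PySem.List.count] <;> ring
        · have := ih (cur ++ [a]) served next_num prints
          have hT : PySem.List.count (cur ++ [a]) "TAKE" = PySem.List.count cur "TAKE" := by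
            simp [PySem.List.count, ht]
          have hS : PySem.List.count (cur ++ [a]) "SERVE" = PySem.List.count cur "SERVE" := by
            simp [PySem.List.count, hs]
          rw [hT, hS] at this
          simpa [hs] using this

-- ===== VERDICT (by name: the statement is the Claim_ definition above) =====
theorem take_a_number_spec : Claim_equal_take_a_number := by
  intro next_num activities _
  unfold Spec_take_a_number take_a_number take_a_number_alt
  have := aLoop_eq_emit activities [] 0 next_num []
  simpa using this
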